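-- pv_equiv track=rewrite | github.com/Drew973/pts_tools | curvature/clumpArray.py | clumpArray
-- ===== SOURCE A (Python) =====
-- def clumpArray(vals):
--     ranges = []
--
--     s = None
--
--     for i, v in enumerate(vals):
--
--         if v:
--             if s is None:
--                 s = i
--
--         else:
--             if not s is None:
--                 ranges.append((s,i-1))
--                 s = None
--
--     if not s is None:
--         ranges.append((s,i))
--
--     return ranges
-- ===== SOURCE B (Python) =====
-- def clumpArray(vals):
--     ranges = []
--     i, n = 0, len(vals)
--     while i < n:
--         v = bool(vals[i])
--         j = i + 1
--         while j < n and bool(vals[j]) == v: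
--             j += 1
--         if v:
--             ranges.append((i, j - 1))
--         i = j
--     return ranges
-- ===== Notes on version B (the rewrite author's own statement) =====
-- stated objective: alternative
-- what changed: B scans the list run-by-run (inner loop measures each maximal run of equal truthiness, emitting one inclusive range per truthy run) instead of A's element-by-element edge detection with a sentinel start index and a post-loop flush.
import Mathlib
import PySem

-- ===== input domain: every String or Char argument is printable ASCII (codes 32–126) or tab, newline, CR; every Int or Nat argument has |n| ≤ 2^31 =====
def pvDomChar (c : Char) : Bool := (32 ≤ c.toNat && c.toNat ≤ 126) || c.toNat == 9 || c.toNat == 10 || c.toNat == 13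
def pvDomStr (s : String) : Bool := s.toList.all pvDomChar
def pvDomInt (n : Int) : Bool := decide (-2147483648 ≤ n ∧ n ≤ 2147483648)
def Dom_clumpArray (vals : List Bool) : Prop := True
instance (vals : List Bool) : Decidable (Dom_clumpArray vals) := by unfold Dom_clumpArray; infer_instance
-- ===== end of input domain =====

-- B scans the list run-by-run (one inclusive range per maximal truthy run) instead of A's
-- element-by-element sentinel edge detection with a post-loop flush; same O(n) cost.


-- ===== PORT A =====
-- the 'for i, v in enumerate(vals)' loop, carried state = (ranges, s)
def clumpArrayLoop : List Bool → Int → (List (Int × Int) × Option Int) → (List (Int × Int) × Option Int)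
  | [], _, st => st
  | v :: rest, i, (ranges, s) =>
    if v then
      clumpArrayLoop rest (i + 1) (ranges, match s with | none => some i | some s0 => some s0)
    else
      match s with
      | none => clumpArrayLoop rest (i + 1) (ranges, none)
      | some s0 => clumpArrayLoop rest (i + 1) (ranges ++ [(s0, i - 1)], none)

def clumpArray (vals : List Bool) : List (Int × Int) :=
  match clumpArrayLoop vals 0 ([], none) with
  | (ranges, some s) => ranges ++ [(s, (vals.length : Int) - 1)]
  -- Python's post-loop 'i' is len(vals)-1; s ≠ None implies the loop ran, so this is exact
  | (ranges, none) => ranges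

-- ===== PORT B =====
-- inner 'while j < n and bool(vals[j]) == v' of Source B: length of the leading run equal to v
def clumpRunLen : List Bool → Bool → Nat
  | [], _ => 0
  | x :: t, v => if x == v then clumpRunLen t v + 1 else 0

-- outer 'while i < n' of Source B, recursion on the remaining suffix, off = current index i
def clumpArrayGo : List Bool → Int → List (Int × Int)
  | [], _ => []
  | v :: t, off =>
    let n : Int := (clumpRunLen t v : Int) + 1      -- j - i
    let out := clumpArrayGo (t.drop (clumpRunLen t v)) (off + n)
    if v then (off, off + n - 1) :: out else out
termination_by l => l.length
decreasing_by
  simp only [List.length_cons, List.length_drop]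
  omega

def clumpArray_alt (vals : List Bool) : List (Int × Int) := clumpArrayGo vals 0

-- ===== PRECONDITION & SPEC =====
def Spec_clumpArray (vals : List Bool) (out : List (Int × Int)) : Prop := out = clumpArray_alt vals
instance (vals : List Bool) (out : List (Int × Int)) : Decidable (Spec_clumpArray vals out) := by unfold Spec_clumpArray; infer_instance

-- ===== CLAIM (what is proved, stated in full; the proofs are below) =====
def Claim_equal_clumpArray : Prop := ∀ (vals : List Bool), Dom_clumpArray vals → Spec_clumpArray vals (clumpArray vals)

-- ===== LEMMAS AND PROOFS =====

-- A's post-loop flush, parameterised by the closing index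
def clumpFin (st : List (Int × Int) × Option Int) (e : Int) : List (Int × Int) :=
  match st with
  | (ranges, some s) => ranges ++ [(s, e)]
  | (ranges, none) => ranges

lemma clumpGo_skip_false (t : List Bool) (i : Int) :
    clumpArrayGo (false :: t) i = clumpArrayGo t (i + 1) := by
  match t with
  | [] => simp [clumpArrayGo, clumpRunLen]
  | true :: r => simp [clumpArrayGo, clumpRunLen]
  | false :: r =>
    simp only [clumpArrayGo, clumpRunLen]
    norm_num
    ring_nf

lemma clump_main : ∀ (n : Nat) (vals : List Bool), vals.length = n →
    (∀ (i : Int) (ranges : List (Int × Int)),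
      clumpFin (clumpArrayLoop vals i (ranges, none)) (i + vals.length - 1)
        = ranges ++ clumpArrayGo vals i) ∧
    (∀ (i : Int) (ranges : List (Int × Int)) (s0 : Int),
      clumpFin (clumpArrayLoop vals i (ranges, some s0)) (i + vals.length - 1)
        = ranges ++ (s0, i + (clumpRunLen vals true : Int) - 1)
            :: clumpArrayGo (vals.drop (clumpRunLen vals true)) (i + clumpRunLen vals true)) := by
  intro n
  induction n using Nat.strong_induction_on with
  | _ n ih =>
    intro vals hlen
    match vals with
    | [] =>
      constructor
      · intro i ranges; simp [clumpArrayLoop, clumpFin, clumpArrayGo]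
      · intro i ranges s0; simp [clumpArrayLoop, clumpFin, clumpRunLen, clumpArrayGo]
    | v :: t =>
      have ht : t.length < n := by simp at hlen; omega
      have IH := ih t.length ht t rfl
      constructor
      · intro i ranges
        cases v with
        | false =>
          have h1 : clumpArrayLoop (false :: t) i (ranges, none)
              = clumpArrayLoop t (i + 1) (ranges, none) := by
            simp [clumpArrayLoop]
          rw [h1, clumpGo_skip_false]
          have := IH.1 (i + 1) ranges
          have harith : (i + 1) + (t.length : Int) - 1 = i + ((false :: t).length : Int) - 1 := by
            simp; omega
          rw [harith] at this
          exact this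
        | true =>
          have h1 : clumpArrayLoop (true :: t) i (ranges, none)
              = clumpArrayLoop t (i + 1) (ranges, some i) := by
            simp [clumpArrayLoop]
          rw [h1]
          have := IH.2 (i + 1) ranges i
          have harith : (i + 1) + (t.length : Int) - 1 = i + ((true :: t).length : Int) - 1 := by
            simp; omega
          rw [harith] at this
          rw [this]
          simp only [clumpArrayGo]
          norm_num
          constructor
          · omega
          · ring_nf
      · intro i ranges s0
        cases v with
        | false =>
          have h1 : clumpArrayLoop (false :: t) i (ranges, some s0)
              = clumpArrayLoop t (i + 1) (ranges ++ [(s0, i - 1)], none) := by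
            simp [clumpArrayLoop]
          rw [h1]
          have := IH.1 (i + 1) (ranges ++ [(s0, i - 1)])
          have harith : (i + 1) + (t.length : Int) - 1 = i + ((false :: t).length : Int) - 1 := by
            simp; omega
          rw [harith] at this
          rw [this, ← clumpGo_skip_false]
          simp [clumpRunLen]
        | true =>
          have h1 : clumpArrayLoop (true :: t) i (ranges, some s0)
              = clumpArrayLoop t (i + 1) (ranges, some s0) := by
            simp [clumpArrayLoop]
          rw [h1]
          have := IH.2 (i + 1) ranges s0
          have harith : (i + 1) + (t.length : Int) - 1 = i + ((true :: t).length : Int) - 1 := by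
            simp; omega
          rw [harith] at this
          rw [this]
          simp only [clumpRunLen]
          norm_num
          constructor
          · omega
          · ring_nf

-- ===== VERDICT (by name: the statement is the Claim_ definition above) =====
theorem clumpArray_spec : Claim_equal_clumpArray := by
  intro vals _
  unfold Spec_clumpArray clumpArray clumpArray_alt
  have h := (clump_main vals.length vals rfl).1 0 []
  simp only [zero_add] at h
  have : clumpFin (clumpArrayLoop vals 0 ([], none)) ((vals.length : Int) - 1)
      = clumpArrayGo vals 0 := by simpa using h
  rw [← this]
  rcases clumpArrayLoop vals 0 ([], none) with ⟨r, s⟩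
  cases s <;> simp [clumpFin]
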